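-- pv_equiv track=rewrite | github.com/ckoons/BubbleSpacetimeTheory | play/toy_315_gallager_bridge.py | build_vig
-- ===== SOURCE A (Python) =====
-- from collections import defaultdict
--
-- def build_vig(clauses, n):
--     """Build Variable Interaction Graph."""
--     adj = defaultdict(set)
--     edges = set()
--     for clause in clauses:
--         vars_in_clause = [abs(lit) - 1 for lit in clause]
--         for i in range(len(vars_in_clause)):
--             for j in range(i + 1, len(vars_in_clause)):
--                 u, v = vars_in_clause[i], vars_in_clause[j]
--                 adj[u].add(v)
--                 adj[v].add(u)
--                 edges.add((min(u, v), max(u, v)))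
--     return adj, edges
-- ===== SOURCE B (Python) =====
-- from collections import defaultdict, deque
--
--
-- def build_vig(clauses, n):
--     """Build Variable Interaction Graph."""
--     adj = defaultdict(set)
--     edges = set()
--     for clause in clauses:
--         rest = deque(abs(lit) - 1 for lit in clause)
--         while rest:
--             u = rest.popleft()
--             for v in rest:
--                 adj[u].add(v)
--                 adj[v].add(u)
--                 edges.add((u, v) if u <= v else (v, u))
--     return adj, edges
-- ===== Notes on version B (the rewrite author's own statement) =====
-- stated objective: alternative
-- what changed: B consumes each clause as a worklist: the variables go into a deque and each popped head is linked to the remaining queue, replacing A's two index loops (range/range with subscripting) with structural head-vs-rest consumption and an if-expression canonicalisation instead of min/max; the pair enumeration order itself is pinned, since any other order changes the observable insertion order of the returned dict and sets.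
import Mathlib
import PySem

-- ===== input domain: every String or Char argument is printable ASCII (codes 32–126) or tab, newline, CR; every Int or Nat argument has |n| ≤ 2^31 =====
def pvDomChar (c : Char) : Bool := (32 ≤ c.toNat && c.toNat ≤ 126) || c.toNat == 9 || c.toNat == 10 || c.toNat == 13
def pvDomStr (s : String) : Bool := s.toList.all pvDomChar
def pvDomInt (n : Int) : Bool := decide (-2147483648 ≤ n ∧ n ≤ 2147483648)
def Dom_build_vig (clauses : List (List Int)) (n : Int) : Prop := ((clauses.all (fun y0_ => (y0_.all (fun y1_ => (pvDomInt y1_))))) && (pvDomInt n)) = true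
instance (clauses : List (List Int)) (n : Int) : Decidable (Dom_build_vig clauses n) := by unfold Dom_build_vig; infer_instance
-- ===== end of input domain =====

-- B consumes each clause as a worklist (head popped off a queue, linked to the remaining
-- queue, then recurse on the rest) instead of A's two index loops over range(len);
-- same asymptotic cost, the pair order is pinned by the observable insertion orders
-- of the returned dict and sets (objective: alternative).


-- ===== PORT A =====
-- shared helper: 'adj[u].add(v)' on a defaultdict(set)
def ddAdd (d : PySem.Dict Int (PySem.Set Int)) (u v : Int) : PySem.Dict Int (PySem.Set Int) :=
  PySem.Dict.modify d u PySem.Set.empty (fun s => PySem.Set.add s v)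

def build_vig (clauses : List (List Int)) (n : Int) : (List (Int × List Int)) × (List (Int × Int)) :=
  let st : PySem.Dict Int (PySem.Set Int) × PySem.Set (Int × Int) :=
    clauses.foldl (fun st clause =>
      let vars := clause.map (fun lit => |lit| - 1)
      (PySem.List.pyRange 0 (PySem.List.len vars) 1).foldl (fun st i =>
        (PySem.List.pyRange (i + 1) (PySem.List.len vars) 1).foldl (fun st j =>
          let u := PySem.List.pyGetD vars i 0
          let v := PySem.List.pyGetD vars j 0
          (ddAdd (ddAdd st.1 u v) v u, PySem.Set.add st.2 (min u v, max u v))) st) st)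
      (PySem.Dict.empty, PySem.Set.empty)
  (st.1.items, st.2)

-- ===== PORT B =====
-- 'while rest: u = rest.popleft(); for v in rest: …' — worklist consumption of one clause
def consumeClause (rest : List Int)
    (st : PySem.Dict Int (PySem.Set Int) × PySem.Set (Int × Int)) :
    PySem.Dict Int (PySem.Set Int) × PySem.Set (Int × Int) :=
  match rest with
  | [] => st
  | u :: rest =>
      consumeClause rest
        (rest.foldl (fun st v =>
          (ddAdd (ddAdd st.1 u v) v u,
           PySem.Set.add st.2 (if u ≤ v then (u, v) else (v, u)))) st)

def build_vig_alt (clauses : List (List Int)) (n : Int) : (List (Int × List Int)) × (List (Int × Int)) :=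
  let st : PySem.Dict Int (PySem.Set Int) × PySem.Set (Int × Int) :=
    clauses.foldl (fun st clause => consumeClause (clause.map (fun lit => |lit| - 1)) st)
      (PySem.Dict.empty, PySem.Set.empty)
  (st.1.items, st.2)

-- ===== PRECONDITION & SPEC =====
def Spec_build_vig (clauses : List (List Int)) (n : Int) (out : (List (Int × List Int)) × (List (Int × Int))) : Prop := out = build_vig_alt clauses n
instance (clauses : List (List Int)) (n : Int) (out : (List (Int × List Int)) × (List (Int × Int))) : Decidable (Spec_build_vig clauses n out) := by unfold Spec_build_vig; infer_instance

-- ===== CLAIM (what is proved, stated in full; the proofs are below) =====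
def Claim_equal_build_vig : Prop := ∀ (clauses : List (List Int)) (n : Int), Dom_build_vig clauses n → Spec_build_vig clauses n (build_vig clauses n)

-- ===== LEMMAS AND PROOFS =====

-- proof-only intermediate: the stream of position pairs of a clause, head-with-each-of-rest first
def combos2 (xs : List Int) : List (Int × Int) :=
  match xs with
  | [] => []
  | x :: rest => rest.map (fun y => (x, y)) ++ combos2 rest

-- A's nested index loops over a clause are one fold over its combos2 list.
theorem loop_eq_combos {S : Type} (f : S → Int → Int → S) (vs : List Int) :
    ∀ (k a : Nat) (st : S), vs.length ≤ a + k →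
      (PySem.List.pyRange a (PySem.List.len vs) 1).foldl (fun st i =>
          (PySem.List.pyRange (i + 1) (PySem.List.len vs) 1).foldl (fun st j =>
            f st (PySem.List.pyGetD vs i 0) (PySem.List.pyGetD vs j 0)) st) st
        = (combos2 (vs.drop a)).foldl (fun st p => f st p.1 p.2) st := by
  intro k
  induction k with
  | zero =>
      intro a st h
      rw [PySem.List.pyRange_one_eq_nil (by simp [PySem.List.len_eq]; exact_mod_cast h),
        List.drop_of_length_le (by omega)]
      rfl
  | succ k ih =>
      intro a st h
      by_cases ha : a < vs.length
      · rw [PySem.List.pyRange_one_cons (by simp [PySem.List.len_eq]; exact_mod_cast ha)]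
        rw [List.foldl_cons]
        have hshift : ((a : Int) + 1) = ((a + 1 : Nat) : Int) := by push_cast; ring
        rw [hshift, ih (a + 1) _ (by omega)]
        rw [List.drop_eq_getElem_cons ha]
        simp only [combos2, List.foldl_append, List.foldl_map]
        congr 1
        have := PySem.List.foldl_pyRange_pyGetD (xs := vs) (d := (0 : Int))
          (f := fun st y => f st (PySem.List.pyGetD vs (a : Int) 0) y) (init := st)
          (a := (a : Int) + 1) (by omega)
        rw [hshift] at this
        rw [this]
        have hget : PySem.List.pyGetD vs (a : Int) 0 = vs[a] := by
          simp [PySem.List.pyGetD_natCast, List.getElem?_eq_getElem ha]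
        rw [hget]
        simp
      · rw [PySem.List.pyRange_one_eq_nil (by simp [PySem.List.len_eq]; omega),
          List.drop_of_length_le (by omega)]
        rfl

-- B's worklist consumption of a clause is the same fold over its combos2 list.
theorem consumeClause_eq_combos (vs : List Int) :
    ∀ (st : PySem.Dict Int (PySem.Set Int) × PySem.Set (Int × Int)),
      consumeClause vs st
        = (combos2 vs).foldl (fun st p =>
            (ddAdd (ddAdd st.1 p.1 p.2) p.2 p.1,
             PySem.Set.add st.2 (if p.1 ≤ p.2 then (p.1, p.2) else (p.2, p.1)))) st := by
  induction vs with
  | nil => intro st; rfl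
  | cons u rest ih =>
      intro st
      simp only [consumeClause, combos2, List.foldl_append, List.foldl_map, ih]

-- the per-pair update written with min/max (A) is the if-expression form (B)
theorem step_minmax_eq_if :
    (fun (st : PySem.Dict Int (PySem.Set Int) × PySem.Set (Int × Int)) (p : Int × Int) =>
      (ddAdd (ddAdd st.1 p.1 p.2) p.2 p.1, PySem.Set.add st.2 (min p.1 p.2, max p.1 p.2)))
      = (fun st p =>
      (ddAdd (ddAdd st.1 p.1 p.2) p.2 p.1,
       PySem.Set.add st.2 (if p.1 ≤ p.2 then (p.1, p.2) else (p.2, p.1)))) := by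
  funext st p
  rcases le_or_gt p.1 p.2 with hle | hlt
  · simp [hle]
  · simp [min_eq_right hlt.le, max_eq_left hlt.le, not_le.mpr hlt]

-- ===== VERDICT (by name: the statement is the Claim_ definition above) =====
theorem build_vig_spec : Claim_equal_build_vig := by
  intro clauses n _
  unfold Spec_build_vig build_vig build_vig_alt
  simp only []
  have hf : (fun (st : PySem.Dict Int (PySem.Set Int) × PySem.Set (Int × Int)) (clause : List Int) =>
      let vars := clause.map (fun lit => |lit| - 1)
      (PySem.List.pyRange 0 (PySem.List.len vars) 1).foldl (fun st i =>
        (PySem.List.pyRange (i + 1) (PySem.List.len vars) 1).foldl (fun st j =>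
          let u := PySem.List.pyGetD vars i 0
          let v := PySem.List.pyGetD vars j 0
          (ddAdd (ddAdd st.1 u v) v u, PySem.Set.add st.2 (min u v, max u v))) st) st)
      = (fun st clause => consumeClause (clause.map (fun lit => |lit| - 1)) st) := by
    funext st clause
    rw [consumeClause_eq_combos, ← step_minmax_eq_if]
    have := loop_eq_combos
      (fun st u v => (ddAdd (ddAdd st.1 u v) v u, PySem.Set.add st.2 (min u v, max u v)))
      (clause.map (fun lit => |lit| - 1)) (clause.map (fun lit => |lit| - 1)).length 0 st
      (by omega)
    simpa using this
  rw [hf]
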